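-- pv_equiv track=rewrite | github.com/jlewisbrewer/language_classification_nn | converter.py | _format_sentence
-- ===== SOURCE A (Python) =====
-- def _format_sentence(s):
--     """Changes certain characters in a string
--
--     Args:
--         s (str) : A sentence string
--
--     Returns:
--         list (str) : A list of formatted words in s
--     """
--
--     digraph = ['s', 'c', 'z', 't', 'n', 'g']
--     replace = ['š', 'č', 'ž', 'þ', 'ŋ', 'ǧ']
--
--     formatted = ''.join(word for word in s if not word.isdigit()
--             and word.isalpha() or word == ' ')
--     formatted = formatted.lower().split()
--     for i in range(len(formatted)):
--         word = list(formatted[i])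
--         for j in range(len(word)):
--             if word[j] == 'h' or word[j] == 'g':
--                 #need to check preceding char
--                 if j > 0:
--                     if word[j-1] in digraph:
--                         index = digraph.index(word[j-1])
--                         word[j-1] = replace[index]
--                         #remove h, replace prev char
--                         word[j] = ''
--         formatted[i] = ''.join(char for char in word)
--
--     return formatted
-- ===== SOURCE B (Python) =====
-- def _format_sentence(s):
--     """Changes certain characters in a string (single forward pairing scan)."""
--     table = {'s': 'š', 'c': 'č', 'z': 'ž', 't': 'þ', 'n': 'ŋ', 'g': 'ǧ'}
--     filtered = ''.join(c for c in s if c.isalpha() or c == ' ').lower()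
--     words = []
--     for w in filtered.split():
--         out = []
--         i = 0
--         n = len(w)
--         while i < n:
--             if i + 1 < n and w[i] in table and w[i + 1] in 'hg':
--                 out.append(table[w[i]])
--                 i += 2
--             else:
--                 out.append(w[i])
--                 i += 1
--         words.append(''.join(out))
--     return words
-- ===== Notes on version B (the rewrite author's own statement) =====
-- stated objective: idiomatic
-- what changed: Replaces A's per-word index loop that looks back at word[j-1] and mutates the list in place (clearing the 'h'/'g' slot and patching the previous slot via digraph.index) with a single forward two-pointer scan that consumes a digraph pair in one step via a lookup table and builds the output directly; the redundant 'not c.isdigit()' test is dropped.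
import Mathlib
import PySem

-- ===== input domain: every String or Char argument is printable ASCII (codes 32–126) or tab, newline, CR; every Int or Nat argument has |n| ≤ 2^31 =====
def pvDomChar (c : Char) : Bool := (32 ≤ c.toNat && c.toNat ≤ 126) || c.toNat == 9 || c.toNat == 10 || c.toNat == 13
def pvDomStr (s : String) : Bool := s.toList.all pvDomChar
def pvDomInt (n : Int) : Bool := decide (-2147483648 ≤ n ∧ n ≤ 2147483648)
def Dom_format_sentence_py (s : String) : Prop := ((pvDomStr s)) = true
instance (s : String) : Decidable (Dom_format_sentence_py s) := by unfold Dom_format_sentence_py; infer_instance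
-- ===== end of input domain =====

-- B replaces A's per-word index loop with look-back mutation by a single forward pairing
-- scan with a lookup table (objective: idiomatic/alternative; return value only).
-- Strings are handled on the List Char side (PySem.Chars); String.ofList only at the boundary.

-- ===== PORT A =====
def pvDigraphA : List (List Char) := [['s'], ['c'], ['z'], ['t'], ['n'], ['g']]
def pvReplaceA : List (List Char) := [['š'], ['č'], ['ž'], ['þ'], ['ŋ'], ['ǧ']]

-- one iteration of A's inner loop body (word as a Python list of 1-char strings)
def pvStepA (w : List (List Char)) (j : Nat) : List (List Char) :=
  if w.getD j [] = ['h'] ∨ w.getD j [] = ['g'] then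
    if 0 < j then
      if w.getD (j - 1) [] ∈ pvDigraphA then
        let index := (PySem.List.index? pvDigraphA (w.getD (j - 1) [])).getD 0
        (w.set (j - 1) (pvReplaceA.getD index [])).set j []
      else w
    else w
  else w

-- A's inner loop over one word: word = list(formatted[i]); for j in range(len(word)): …; ''.join(word)
def pvWordA (w : List Char) : List Char :=
  let word := w.map (fun c => [c])
  PySem.Chars.join [] ((List.range word.length).foldl pvStepA word)

def format_sentence_py (s : String) : List String :=
  let formatted := PySem.Chars.split₀ (PySem.Chars.lower
    (s.toList.filter (fun c => (!(PySem.Chars.isdigit c) && PySem.Chars.isalpha c) || (c == ' '))))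
  let formatted := (List.range formatted.length).foldl
    (fun fm i => fm.set i (pvWordA (fm.getD i []))) formatted
  formatted.map (fun w => String.ofList w)

-- ===== PORT B =====
def pvTableB : PySem.Dict Char Char :=
  PySem.Dict.mk [('s', 'š'), ('c', 'č'), ('z', 'ž'), ('t', 'þ'), ('n', 'ŋ'), ('g', 'ǧ')]

-- the while loop of B: consume two chars on a digraph match, else one
def pvScanB : List Char → List Char
  | a :: b :: rest =>
    if PySem.Dict.contains pvTableB a = true ∧ (b = 'h' ∨ b = 'g') then
      (PySem.Dict.get? pvTableB a).getD a :: pvScanB rest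
    else
      a :: pvScanB (b :: rest)
  | l => l

def format_sentence_py_alt (s : String) : List String :=
  let filtered := PySem.Chars.lower
    (s.toList.filter (fun c => PySem.Chars.isalpha c || (c == ' ')))
  (PySem.Chars.split₀ filtered).map (fun w => String.ofList (pvScanB w))

-- ===== PRECONDITION & SPEC =====
def Spec_format_sentence_py (s : String) (out : List String) : Prop := out = format_sentence_py_alt s
instance (s : String) (out : List String) : Decidable (Spec_format_sentence_py s out) := by unfold Spec_format_sentence_py; infer_instance

-- ===== CLAIM (what is proved, stated in full; the proofs are below) =====
def Claim_equal_format_sentence_py : Prop := ∀ (s : String), Dom_format_sentence_py s → Spec_format_sentence_py s (format_sentence_py s)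

-- ===== LEMMAS AND PROOFS =====

-- list plumbing for states of the shape  pre ++ suffix
lemma pvGetDAppend0 {α : Type} (pre : List α) (x : α) (t : List α) (d : α) :
    (pre ++ x :: t).getD pre.length d = x := by
  simp [List.getD]

lemma pvSetAppend0 {α : Type} (pre : List α) (x : α) (t : List α) (v : α) :
    (pre ++ x :: t).set pre.length v = pre ++ v :: t := by
  rw [List.set_append_right _ _ (le_refl _)]
  simp

lemma pvSetAppend1 {α : Type} (pre : List α) (x y : α) (t : List α) (v : α) :
    (pre ++ x :: y :: t).set (pre.length + 1) v = pre ++ x :: v :: t := by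
  rw [List.set_append_right _ _ (by omega : pre.length ≤ pre.length + 1)]
  have h1 : pre.length + 1 - pre.length = 1 := by omega
  simp [h1]

-- a digit is never a letter, so A's 'not c.isdigit() and c.isalpha()' is just 'c.isalpha()'
lemma pvFilter_eq (cs : List Char) :
    cs.filter (fun c => (!(PySem.Chars.isdigit c) && PySem.Chars.isalpha c) || (c == ' '))
      = cs.filter (fun c => PySem.Chars.isalpha c || (c == ' ')) := by
  apply List.filter_congr
  intro c _
  cases hd : PySem.Chars.isdigit c
  · simp
  · have hA : PySem.Chars.isalpha c = false := by
      simp only [PySem.Chars.isdigit, Bool.and_eq_true, decide_eq_true_eq] at hd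
      have h1 : ¬ ('A' ≤ c) := not_le.mpr (lt_of_le_of_lt hd.2 (by decide))
      have h2 : ¬ ('a' ≤ c) := not_le.mpr (lt_of_le_of_lt hd.2 (by decide))
      simp [PySem.Chars.isalpha, PySem.Chars.isupper, PySem.Chars.islower, h1, h2]
    simp [hA]

lemma pvMem_digraphA (a : Char) :
    [a] ∈ pvDigraphA ↔ PySem.Dict.contains pvTableB a = true := by
  simp [pvDigraphA, pvTableB]
  tauto

lemma pvPiece_eq (a : Char) (ha : PySem.Dict.contains pvTableB a = true) :
    pvReplaceA.getD ((PySem.List.index? pvDigraphA [a]).getD 0) []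
      = [(PySem.Dict.get? pvTableB a).getD a] := by
  have h : a = 's' ∨ a = 'c' ∨ a = 'z' ∨ a = 't' ∨ a = 'n' ∨ a = 'g' := by
    simp [pvTableB] at ha
    tauto
  rcases h with h | h | h | h | h | h <;> subst h <;> decide

-- the pieces A's inner loop leaves behind, expressed by the same two-case recursion as pvScanB
def pvPieces : List Char → List (List Char)
  | a :: b :: r =>
    if PySem.Dict.contains pvTableB a = true ∧ (b = 'h' ∨ b = 'g') then
      [(PySem.Dict.get? pvTableB a).getD a] :: [] :: pvPieces r
    else
      [a] :: pvPieces (b :: r)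
  | l => l.map (fun c => [c])

lemma pvStepA_noop (pre : List (List Char)) (a : Char) (t : List Char)
    (hb : ∀ p ∈ pre.getLast?, ¬(p ∈ pvDigraphA ∧ (a = 'h' ∨ a = 'g'))) :
    pvStepA (pre ++ (a :: t).map (fun c => [c])) pre.length
      = pre ++ (a :: t).map (fun c => [c]) := by
  have hj : (pre ++ (a :: t).map (fun c => [c])).getD pre.length [] = [a] := by
    simp
  unfold pvStepA
  rw [hj]
  by_cases hA : ([a] : List Char) = ['h'] ∨ ([a] : List Char) = ['g']
  · rw [if_pos hA]
    cases hpre : pre.getLast? with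
    | none =>
      have hnil : pre = [] := by
        cases pre with
        | nil => rfl
        | cons q qs => simp [List.getLast?_eq_getElem?] at hpre
      subst hnil
      simp
    | some p =>
      have hne : pre ≠ [] := by
        intro h; subst h; simp at hpre
      have hpos : 0 < pre.length := List.length_pos_iff.mpr hne
      rw [if_pos hpos]
      have hlt : pre.length - 1 < pre.length := by omega
      have hj1 : (pre ++ (a :: t).map (fun c => [c])).getD (pre.length - 1) [] = p := by
        simp [List.getD, List.getElem?_append_left hlt, ← List.getLast?_eq_getElem?, hpre]
      rw [hj1, if_neg]
      have haw : a = 'h' ∨ a = 'g' := by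
        rcases hA with h | h <;> simp_all
      exact fun hmem => hb p (by simp [hpre]) ⟨hmem, haw⟩
  · rw [if_neg hA]

lemma pvPieces_cons_ne_nil (x : Char) (t : List Char) : pvPieces (x :: t) ≠ [] := by
  cases t with
  | nil => simp [pvPieces]
  | cons y t => simp only [pvPieces]; split <;> simp

lemma pvFoldA_eq (n : Nat) : ∀ (suf : List Char), suf.length ≤ n →
    ∀ (pre : List (List Char)),
    (∀ p ∈ pre.getLast?, ∀ a ∈ suf.head?, ¬(p ∈ pvDigraphA ∧ (a = 'h' ∨ a = 'g'))) →
    (List.range' pre.length suf.length).foldl pvStepA (pre ++ suf.map (fun c => [c]))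
      = pre ++ pvPieces suf := by
  induction n with
  | zero =>
    intro suf hle pre _
    have hnil : suf = [] := by
      cases suf with
      | nil => rfl
      | cons x t => simp at hle
    subst hnil
    simp [pvPieces]
  | succ n ih =>
    intro suf hle pre hb
    match suf with
    | [] => simp [pvPieces]
    | [a] =>
      have hb1 : ∀ p ∈ pre.getLast?, ¬(p ∈ pvDigraphA ∧ (a = 'h' ∨ a = 'g')) :=
        fun p hp => hb p hp a rfl
      simp only [List.length_cons, List.length_nil, Nat.zero_add, List.range'_one,
        List.foldl_cons, List.foldl_nil]
      rw [pvStepA_noop pre a [] hb1]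
      simp [pvPieces]
    | a :: b :: r =>
      have hb1 : ∀ p ∈ pre.getLast?, ¬(p ∈ pvDigraphA ∧ (a = 'h' ∨ a = 'g')) :=
        fun p hp => hb p hp a rfl
      by_cases hp : PySem.Dict.contains pvTableB a = true ∧ (b = 'h' ∨ b = 'g')
      · -- the digraph fires at positions pre.length, pre.length+1
        simp only [List.length_cons]
        rw [List.range'_succ, List.range'_succ, List.foldl_cons, List.foldl_cons]
        rw [pvStepA_noop pre a (b :: r) hb1]
        have hBtrig : ([b] : List Char) = ['h'] ∨ ([b] : List Char) = ['g'] := by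
          rcases hp.2 with h | h <;> subst h <;> simp
        have hfired :
            pvStepA (pre ++ (a :: b :: r).map (fun c => [c])) (pre.length + 1)
              = (pre ++ [[(PySem.Dict.get? pvTableB a).getD a], []]) ++ r.map (fun c => [c]) := by
          have h1 : (pre ++ (a :: b :: r).map (fun c => [c])).getD (pre.length + 1) [] = [b] := by
            simp
          have h2 : (pre ++ (a :: b :: r).map (fun c => [c])).getD (pre.length + 1 - 1) [] = [a] := by
            have : pre.length + 1 - 1 = pre.length := by omega
            rw [this]
            simp
          unfold pvStepA
          rw [h1, h2, if_pos hBtrig, if_pos (by omega : 0 < pre.length + 1),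
            if_pos ((pvMem_digraphA a).mpr hp.1)]
          simp only [pvPiece_eq a hp.1, show pre.length + 1 - 1 = pre.length from by omega]
          have hset1 : (pre ++ (a :: b :: r).map (fun c => [c])).set pre.length
              [(PySem.Dict.get? pvTableB a).getD a]
              = pre ++ [(PySem.Dict.get? pvTableB a).getD a] :: [b] :: r.map (fun c => [c]) := by
            have : pre.length + 1 - 1 = pre.length := by omega
            simp [pvSetAppend0 pre [a] ([b] :: r.map (fun c => [c]))
              [(PySem.Dict.get? pvTableB a).getD a]]
          rw [hset1, pvSetAppend1]
          simp
        rw [hfired]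
        have hlast : ((pre ++ [[(PySem.Dict.get? pvTableB a).getD a], []])).getLast? = some [] := by
          have : pre ++ [[(PySem.Dict.get? pvTableB a).getD a], []]
              = (pre ++ [[(PySem.Dict.get? pvTableB a).getD a]]) ++ [([] : List Char)] := by simp
          rw [this, List.getLast?_concat]
        have hb2 : ∀ p ∈ (pre ++ [[(PySem.Dict.get? pvTableB a).getD a], []]).getLast?,
            ∀ x ∈ r.head?, ¬(p ∈ pvDigraphA ∧ (x = 'h' ∨ x = 'g')) := by
          intro p hp' x _
          rw [hlast] at hp'
          simp only [Option.mem_def, Option.some.injEq] at hp'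
          subst hp'
          intro hcontra
          exact absurd hcontra.1 (by decide)
        have hlen : (pre ++ [[(PySem.Dict.get? pvTableB a).getD a], []]).length = pre.length + 1 + 1 := by
          simp
        have := ih r (by simp at hle; omega) (pre ++ [[(PySem.Dict.get? pvTableB a).getD a], []]) hb2
        rw [hlen] at this
        rw [this]
        simp only [pvPieces, if_pos hp]
        simp
      · -- no digraph at the boundary: shift one character into the prefix
        simp only [List.length_cons]
        rw [List.range'_succ, List.foldl_cons]
        rw [pvStepA_noop pre a (b :: r) hb1]
        have hS : pre ++ (a :: b :: r).map (fun c => [c])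
            = (pre ++ [[a]]) ++ (b :: r).map (fun c => [c]) := by simp
        have hb2 : ∀ p ∈ (pre ++ [[a]]).getLast?, ∀ x ∈ (b :: r).head?,
            ¬(p ∈ pvDigraphA ∧ (x = 'h' ∨ x = 'g')) := by
          intro p hp' x hx
          rw [List.getLast?_concat] at hp'
          simp only [Option.mem_def, Option.some.injEq] at hp'
          subst hp'
          simp only [List.head?_cons, Option.mem_def, Option.some.injEq] at hx
          subst hx
          intro hcontra
          exact hp ⟨(pvMem_digraphA a).mp hcontra.1, hcontra.2⟩
        have := ih (b :: r) (by simp at hle ⊢; omega) (pre ++ [[a]]) hb2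
        rw [hS]
        have hlen : (pre ++ [[a]]).length = pre.length + 1 := by simp
        rw [hlen] at this
        simp only [List.length_cons] at this
        rw [this]
        simp only [pvPieces, if_neg hp]
        simp

lemma pvJoin_pieces (n : Nat) : ∀ (w : List Char), w.length ≤ n →
    PySem.Chars.join [] (pvPieces w) = pvScanB w := by
  induction n with
  | zero =>
    intro w hle
    have hnil : w = [] := by
      cases w with
      | nil => rfl
      | cons x t => simp at hle
    subst hnil
    simp [pvPieces, pvScanB, PySem.Chars.join_nil]
  | succ n ih =>
    intro w hle
    match w with
    | [] => simp [pvPieces, pvScanB, PySem.Chars.join_nil]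
    | [a] => simp [pvPieces, pvScanB, PySem.Chars.join_singleton]
    | a :: b :: r =>
      by_cases hp : PySem.Dict.contains pvTableB a = true ∧ (b = 'h' ∨ b = 'g')
      · simp only [pvPieces, pvScanB, if_pos hp]
        rw [PySem.Chars.join_cons_cons]
        have hr : PySem.Chars.join [] ([] :: pvPieces r) = PySem.Chars.join [] (pvPieces r) := by
          cases hq : pvPieces r with
          | nil => simp [PySem.Chars.join_singleton, PySem.Chars.join_nil]
          | cons q rest => rw [PySem.Chars.join_cons_cons]; simp
        rw [hr, ih r (by simp at hle; omega)]
        simp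
      · simp only [pvPieces, pvScanB, if_neg hp]
        obtain ⟨q, rest, hq⟩ := List.exists_cons_of_ne_nil (pvPieces_cons_ne_nil b r)
        rw [hq, PySem.Chars.join_cons_cons, ← hq, ih (b :: r) (by simp at hle ⊢; omega)]
        simp

lemma pvWordA_eq_scan (w : List Char) : pvWordA w = pvScanB w := by
  unfold pvWordA
  simp only [List.length_map]
  rw [List.range_eq_range']
  have h := pvFoldA_eq w.length w (le_refl _) [] (by simp)
  simp only [List.length_nil, List.nil_append] at h
  rw [h]
  exact pvJoin_pieces w.length w (le_refl _)

lemma pvFoldSet {α : Type} (g : α → α) (d : α) :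
    ∀ (suf pre : List α),
    (List.range' pre.length suf.length).foldl (fun acc i => acc.set i (g (acc.getD i d))) (pre ++ suf)
      = pre ++ suf.map g := by
  intro suf
  induction suf with
  | nil => intro pre; simp
  | cons x t ihs =>
    intro pre
    rw [List.length_cons, List.range'_succ, List.foldl_cons]
    rw [pvGetDAppend0 pre x t d, pvSetAppend0 pre x t (g x)]
    have hS : pre ++ g x :: t = (pre ++ [g x]) ++ t := by simp
    rw [hS]
    have := ihs (pre ++ [g x])
    have hlen : (pre ++ [g x]).length = pre.length + 1 := by simp
    rw [hlen] at this
    rw [this]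
    simp

-- ===== VERDICT (by name: the statement is the Claim_ definition above) =====
theorem format_sentence_py_spec : Claim_equal_format_sentence_py := by
  intro s _
  unfold Spec_format_sentence_py format_sentence_py format_sentence_py_alt
  rw [pvFilter_eq]
  dsimp only []
  rw [List.range_eq_range']
  have h := pvFoldSet pvWordA ([] : List Char)
    (PySem.Chars.split₀ (PySem.Chars.lower
      (s.toList.filter (fun c => PySem.Chars.isalpha c || (c == ' '))))) []
  simp only [List.length_nil, List.nil_append] at h
  rw [h, List.map_map]
  exact List.map_congr_left (fun w _ => by simp [Function.comp, pvWordA_eq_scan])
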